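-- pv_equiv track=rewrite | github.com/James-Oswald/IEEE-Professional-Development-Night | 4-12-21/pyrmidArray.py | pyramid
-- ===== SOURCE A (Python) =====
-- def pyramid(n):
--     array = [1]
--     ar = []
--     arr = []
--     if n == 0:
--         return ar
--     while n > 0:
--         ar += array
--         arr.append(ar.copy())
--         n -= 1
--     return arr
-- ===== SOURCE B (Python) =====
-- def pyramid(n):
--     return [[1] * i for i in range(1, n + 1)]
-- ===== Notes on version B (the rewrite author's own statement) =====
-- stated objective: simpler
-- what changed: Dropped the running accumulator that is extended and copied each iteration; each row is constructed directly from its own length as [1]*i over range(1, n+1).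
import Mathlib
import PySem

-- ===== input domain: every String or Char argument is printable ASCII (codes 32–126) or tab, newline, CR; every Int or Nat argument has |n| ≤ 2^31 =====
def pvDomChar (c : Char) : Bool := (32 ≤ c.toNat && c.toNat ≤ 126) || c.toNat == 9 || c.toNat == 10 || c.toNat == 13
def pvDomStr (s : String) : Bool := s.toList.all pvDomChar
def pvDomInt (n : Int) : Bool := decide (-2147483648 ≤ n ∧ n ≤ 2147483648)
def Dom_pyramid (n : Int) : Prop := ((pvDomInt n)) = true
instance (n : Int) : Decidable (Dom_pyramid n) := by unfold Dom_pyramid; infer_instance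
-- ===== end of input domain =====

-- B drops A's running accumulator (extended and copied each iteration) and builds each row
-- directly from its own length; same return value, objective: simpler.

-- ===== PORT A =====
-- the while loop: state ar (the growing row) and arr (the result); 'ar += array' with array = [1]
def pyramidLoop (n : Int) (ar : List Int) (arr : List (List Int)) : List (List Int) :=
  if h : n > 0 then
    pyramidLoop (n - 1) (ar ++ [1]) (arr ++ [ar ++ [1]])
  else arr
termination_by n.toNat
decreasing_by omega

def pyramid (n : Int) : List (List Int) :=
  if n = 0 then [] else pyramidLoop n [] []

-- ===== PORT B =====
def pyramid_alt (n : Int) : List (List Int) :=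
  (PySem.List.pyRange 1 (n + 1) 1).map (fun i => List.replicate i.toNat 1)

-- ===== PRECONDITION & SPEC =====
def Spec_pyramid (n : Int) (out : List (List Int)) : Prop := out = pyramid_alt n
instance (n : Int) (out : List (List Int)) : Decidable (Spec_pyramid n out) := by unfold Spec_pyramid; infer_instance

-- ===== CLAIM (what is proved, stated in full; the proofs are below) =====
def Claim_equal_pyramid : Prop := ∀ (n : Int), Dom_pyramid n → Spec_pyramid n (pyramid n)

-- ===== LEMMAS AND PROOFS =====
theorem pyramidLoop_eq (m : Nat) : ∀ (n : Int), n.toNat = m → ∀ (ar : List Int) (arr : List (List Int)),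
    pyramidLoop n ar arr = arr ++ (List.range m).map (fun k => ar ++ List.replicate (k + 1) 1) := by
  induction m with
  | zero =>
    intro n hn ar arr
    rw [pyramidLoop]
    simp only [List.range_zero, List.map_nil, List.append_nil]
    rw [dif_neg (by omega)]
  | succ m ih =>
    intro n hn ar arr
    rw [pyramidLoop, dif_pos (by omega)]
    rw [ih (n - 1) (by omega)]
    rw [List.range_succ_eq_map]
    simp only [List.map_cons, List.map_map, List.append_assoc, List.cons_append, List.nil_append]
    have hmap : (List.range m).map (fun k => ar ++ 1 :: List.replicate (k + 1) 1)
        = (List.range m).map ((fun k => ar ++ List.replicate (k + 1) 1) ∘ Nat.succ) :=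
      List.map_congr_left fun k _ => by simp [List.replicate_succ]
    rw [hmap]
    simp [List.replicate_succ]

theorem pyramid_spec : Claim_equal_pyramid := by
  intro n _
  unfold Spec_pyramid pyramid pyramid_alt
  rw [PySem.List.pyRange_one]
  have h1 : (n + 1 - 1).toNat = n.toNat := by omega
  rw [h1]
  by_cases h : n = 0
  · simp [h]
  · rw [if_neg h, pyramidLoop_eq n.toNat n rfl]
    simp only [List.nil_append, List.map_map]
    congr 1
    funext k
    simp only [Function.comp]
    congr 1
    omega
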